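-- pv_equiv track=rewrite | github.com/govindvgd/MCQs_generator | mcq_generator.py | map_sentences_to_keywords
-- ===== SOURCE A (Python) =====
-- def map_sentences_to_keywords(sentences, keywords):
--     mapped = []
--     for sentence in sentences:
--         for keyword in keywords:
--             if keyword.lower() in sentence.lower():
--                 mapped.append((sentence, keyword))
--                 break
--     return mapped
-- ===== SOURCE B (Python) =====
-- def map_sentences_to_keywords(sentences, keywords):
--     # Keyword-major pass: lower every sentence once, then sweep the keywords in
--     # order, recording for each sentence the index of the first keyword that
--     # occurs in it; finally emit the mapped pairs in sentence order.
--     lows = [sentence.lower() for sentence in sentences]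
--     best = [None] * len(sentences)
--     for j, keyword in enumerate(keywords):
--         lk = keyword.lower()
--         best = [b if b is not None else (j if lk in s else None)
--                 for b, s in zip(best, lows)]
--     return [(sentence, keywords[j])
--             for sentence, j in zip(sentences, best) if j is not None]
-- ===== Notes on version B (the rewrite author's own statement) =====
-- stated objective: alternative
-- what changed: B transposes the loops: it lowers every sentence and keyword once, then sweeps the keywords in order (keyword-major), recording per sentence the index of the first keyword contained in it, and finally emits the pairs in sentence order; A scans keywords per sentence with a break and re-lowers the sentence for every keyword.
import Mathlib
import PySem

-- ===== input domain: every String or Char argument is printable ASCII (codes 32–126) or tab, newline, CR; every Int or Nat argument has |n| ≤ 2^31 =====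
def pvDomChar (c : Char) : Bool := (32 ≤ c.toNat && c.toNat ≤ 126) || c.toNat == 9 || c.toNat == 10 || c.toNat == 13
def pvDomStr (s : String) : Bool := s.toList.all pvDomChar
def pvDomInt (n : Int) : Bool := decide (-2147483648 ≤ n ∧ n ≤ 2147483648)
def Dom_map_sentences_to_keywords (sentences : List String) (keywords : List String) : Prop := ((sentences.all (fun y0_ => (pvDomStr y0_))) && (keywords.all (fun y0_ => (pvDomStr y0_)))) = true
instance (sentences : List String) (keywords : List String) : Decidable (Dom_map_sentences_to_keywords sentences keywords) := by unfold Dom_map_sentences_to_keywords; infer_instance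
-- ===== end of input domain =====

-- B replaces A's sentence-major loop (first keyword substring-searched per sentence, with
-- repeated lowering of the sentence) by a keyword-major sweep that lowers every string once
-- and records per sentence the index of the first keyword occurring in it;
-- objective: alternative algorithm, proved to return the same list.


-- ===== PORT A =====
-- 'for keyword in keywords: if …: append; break' = first keyword satisfying the test, i.e. find?
def map_sentences_to_keywords (sentences : List String) (keywords : List String) : List (String × String) :=
  sentences.foldl (fun mapped sentence =>
    match keywords.find? (fun keyword =>
        PySem.Str.isIn (PySem.Str.lower keyword) (PySem.Str.lower sentence)) with
    | some keyword => mapped ++ [(sentence, keyword)]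
    | none => mapped) []

-- ===== PORT B =====
def map_sentences_to_keywords_alt (sentences : List String) (keywords : List String) : List (String × String) :=
  -- lows = [sentence.lower() for sentence in sentences]
  let lows := sentences.map PySem.Str.lower
  -- best = [None] * len(sentences); for j, keyword in enumerate(keywords): …
  let best := (PySem.List.enumerate keywords 0).foldl
    (fun best (jk : Int × String) =>
      let lk := PySem.Str.lower jk.2
      -- best = [b if b is not None else (j if lk in s else None) for b, s in zip(best, lows)]
      List.zipWith (fun (b : Option Int) s =>
        match b with
        | some b => some b
        | none => if PySem.Str.isIn lk s then some jk.1 else none) best lows)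
    (List.replicate sentences.length (none : Option Int))
  -- [(sentence, keywords[j]) for sentence, j in zip(sentences, best) if j is not None]
  (sentences.zip best).filterMap (fun p =>
    p.2.bind (fun j => (PySem.List.pyGet? keywords j).map (fun k => (p.1, k))))

-- ===== PRECONDITION & SPEC =====
def Spec_map_sentences_to_keywords (sentences : List String) (keywords : List String) (out : List (String × String)) : Prop := out = map_sentences_to_keywords_alt sentences keywords
instance (sentences : List String) (keywords : List String) (out : List (String × String)) : Decidable (Spec_map_sentences_to_keywords sentences keywords out) := by unfold Spec_map_sentences_to_keywords; infer_instance

-- ===== CLAIM (what is proved, stated in full; the proofs are below) =====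
def Claim_equal_map_sentences_to_keywords : Prop := ∀ (sentences : List String) (keywords : List String), Dom_map_sentences_to_keywords sentences keywords → Spec_map_sentences_to_keywords sentences keywords (map_sentences_to_keywords sentences keywords)

-- ===== LEMMAS AND PROOFS =====

-- index of the first element satisfying p
def firstIdx {α : Type} (p : α → Bool) : List α → Option Nat
  | [] => none
  | x :: t => if p x then some 0 else (firstIdx p t).map (· + 1)

theorem find?_eq_bind_firstIdx {α : Type} (p : α → Bool) (xs : List α) :
    xs.find? p = (firstIdx p xs).bind (fun j => xs[j]?) := by
  induction xs with
  | nil => rfl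
  | cons x t ih =>
    by_cases h : p x
    · simp [firstIdx, List.find?, h]
    · simp only [firstIdx, List.find?, h, Bool.false_eq_true, if_false]
      cases hf : firstIdx p t <;> simp [hf] at ih ⊢ <;> simpa using ih

theorem firstIdx_lt_length {α : Type} (p : α → Bool) (xs : List α) (j : Nat)
    (h : firstIdx p xs = some j) : j < xs.length := by
  induction xs generalizing j with
  | nil => simp [firstIdx] at h
  | cons x t ih =>
    by_cases hp : p x
    · simp only [firstIdx, hp, if_true, Option.some.injEq] at h
      simp only [List.length_cons]; omega
    · simp only [firstIdx, hp, Bool.false_eq_true, if_false] at h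
      cases hf : firstIdx p t with
      | none => simp [hf] at h
      | some j' =>
        simp [hf] at h
        have := ih j' hf
        simp only [List.length_cons]
        omega

-- B's scalar step on one sentence's best slot
def stepB (s : String) (j : Int) (k : String) (b : Option Int) : Option Int :=
  match b with
  | some b => some b
  | none => if PySem.Str.isIn (PySem.Str.lower k) s then some j else none

-- folding stepB over enumerate ks n from acc = acc <|> first matching index (offset by n)
theorem foldl_stepB (s : String) (ks : List String) (n : Int) (acc : Option Int) :
    (PySem.List.enumerate ks n).foldl (fun b jk => stepB s jk.1 jk.2 b) acc
      = (acc.or ((firstIdx (fun k => PySem.Str.isIn (PySem.Str.lower k) s) ks).map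
          (fun j => n + (j : Int)))) := by
  induction ks generalizing n acc with
  | nil =>
    rw [PySem.List.enumerate_nil]
    cases acc <;> rfl
  | cons k t ih =>
    rw [PySem.List.enumerate_cons]
    simp only [List.foldl_cons, ih, firstIdx]
    cases acc with
    | some a => rfl
    | none =>
      simp only [stepB]
      by_cases hk : PySem.Str.isIn (PySem.Str.lower k) s = true
      · rw [if_pos hk, if_pos hk]
        simp [Option.or]
      · rw [if_neg hk, if_neg hk]
        cases hf : firstIdx (fun k => PySem.Str.isIn (PySem.Str.lower k) s) t
        · simp
        · simp
          ring

-- zipWith of a pointwise function against xs.map h collapses to a map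
theorem zipWith_map_left {α β : Type} (f : β → α → β) (h : α → β) (xs : List α) :
    List.zipWith f (xs.map h) xs = xs.map (fun x => f (h x) x) := by
  induction xs with
  | nil => rfl
  | cons x t ih => simp [ih]

-- the whole keyword sweep, pointwise on the sentence list
theorem best_eq (sentences keywords : List String) :
    ((PySem.List.enumerate keywords 0).foldl
      (fun best (jk : Int × String) =>
        List.zipWith (fun (b : Option Int) s =>
          match b with
          | some b => some b
          | none => if PySem.Str.isIn (PySem.Str.lower jk.2) s then some jk.1 else none)
          best (sentences.map PySem.Str.lower))
      (List.replicate sentences.length (none : Option Int)))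
    = sentences.map (fun sent =>
        (firstIdx (fun k => PySem.Str.isIn (PySem.Str.lower k) (PySem.Str.lower sent))
          keywords).map (fun j => (j : Int))) := by
  have key : ∀ (E : List (Int × String)) (acc : String → Option Int),
      E.foldl
        (fun best (jk : Int × String) =>
          List.zipWith (fun (b : Option Int) s =>
            match b with
            | some b => some b
            | none => if PySem.Str.isIn (PySem.Str.lower jk.2) s then some jk.1 else none)
            best (sentences.map PySem.Str.lower))
        ((sentences.map PySem.Str.lower).map acc)
      = (sentences.map PySem.Str.lower).map
          (fun s => E.foldl (fun b jk => stepB s jk.1 jk.2 b) (acc s)) := by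
    intro E
    induction E with
    | nil => intro acc; simp
    | cons jk t ih =>
      intro acc
      simp only [List.foldl_cons]
      rw [zipWith_map_left]
      exact ih (fun s => stepB s jk.1 jk.2 (acc s))
  have hrep : (List.replicate sentences.length (none : Option Int))
      = (sentences.map PySem.Str.lower).map (fun _ => (none : Option Int)) := by
    simp [Function.comp_def, List.map_const']
  rw [hrep, key (PySem.List.enumerate keywords 0) (fun _ => none)]
  rw [List.map_map]
  refine List.map_congr_left (fun sent _ => ?_)
  simp only [Function.comp]
  rw [foldl_stepB]
  rw [Option.none_or]
  cases firstIdx (fun k => PySem.Str.isIn (PySem.Str.lower k) (PySem.Str.lower sent)) keywords <;> simp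

-- A's append-fold equals a filterMap
theorem foldlA_eq (keywords : List String) (xs : List String) (acc : List (String × String)) :
    xs.foldl (fun mapped sentence =>
      match keywords.find? (fun keyword =>
          PySem.Str.isIn (PySem.Str.lower keyword) (PySem.Str.lower sentence)) with
      | some keyword => mapped ++ [(sentence, keyword)]
      | none => mapped) acc
    = acc ++ xs.filterMap (fun sentence =>
        (keywords.find? (fun keyword =>
          PySem.Str.isIn (PySem.Str.lower keyword) (PySem.Str.lower sentence))).map
          (fun k => (sentence, k))) := by
  induction xs generalizing acc with
  | nil => simp
  | cons x t ih =>
    simp only [List.foldl_cons, List.filterMap_cons]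
    cases h : keywords.find? (fun keyword =>
        PySem.Str.isIn (PySem.Str.lower keyword) (PySem.Str.lower x)) with
    | some k =>
      simp only [Option.map_some]
      rw [ih]
      simp
    | none =>
      simp only [Option.map_none]
      rw [ih]

theorem zip_self_map {α β : Type} (xs : List α) (g : α → β) :
    xs.zip (xs.map g) = xs.map (fun x => (x, g x)) := by
  induction xs with
  | nil => rfl
  | cons x t ih => simp [ih]

-- ===== VERDICT (by name: the statement is the Claim_ definition above) =====
theorem map_sentences_to_keywords_spec : Claim_equal_map_sentences_to_keywords := by
  intro sentences keywords _
  unfold Spec_map_sentences_to_keywords map_sentences_to_keywords map_sentences_to_keywords_alt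
  simp only []
  rw [best_eq, foldlA_eq, List.nil_append]
  rw [zip_self_map]
  rw [List.filterMap_map]
  refine List.filterMap_congr (fun sent _ => ?_)
  simp only [Function.comp]
  rw [find?_eq_bind_firstIdx]
  cases hf : firstIdx (fun keyword =>
      PySem.Str.isIn (PySem.Str.lower keyword) (PySem.Str.lower sent)) keywords with
  | none => simp
  | some j =>
    have hj := firstIdx_lt_length _ _ _ hf
    simp [PySem.List.pyGet?_natCast, List.getElem?_eq_getElem hj]
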